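-- pv_equiv track=rewrite | github.com/dholman7/danholman-portfolio | ai-rulesets/src/ai_rulesets/validation/issue_fixer.py | _fix_markdown_formatting
-- ===== SOURCE A (Python) =====
-- def _fix_markdown_formatting(content: str) -> str:
--     """Fix common Markdown formatting issues."""
--     lines = content.split('\n')
--     fixed_lines = []
--
--     for i, line in enumerate(lines):
--         # Fix heading spacing
--         if line.startswith('#'):
--             # Ensure there's a space after #
--             if not line.startswith('# '):
--                 line = line.replace('#', '# ', 1)
--             fixed_lines.append(line)
--         # Fix list formatting
--         elif line.strip().startswith('- ') or line.strip().startswith('* '):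
--             # Ensure consistent list markers
--             if line.strip().startswith('* '):
--                 line = line.replace('* ', '- ', 1)
--             fixed_lines.append(line)
--         # Fix code block formatting
--         elif line.strip().startswith('```'):
--             fixed_lines.append(line)
--         else:
--             fixed_lines.append(line)
--
--     return '\n'.join(fixed_lines)
-- ===== SOURCE B (Python) =====
-- def _fix_markdown_formatting(content: str) -> str:
--     """Fix common Markdown formatting issues (single streaming scan, no split/join of a line list)."""
--     out = []
--     n = len(content)
--     i = 0
--     while True:
--         # i is at the start of a line; locate its end
--         end = content.find('\n', i)
--         if end == -1:
--             end = n
--         if i < end and content[i] == '#':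
--             # heading: guarantee one space after the leading '#'
--             if i + 1 < end and content[i + 1] == ' ':
--                 out.append(content[i:end])
--             else:
--                 out.append('# ')
--                 out.append(content[i + 1:end])
--         else:
--             # list item: normalise '* ' to '- ' right after the indentation,
--             # provided something non-blank follows the marker
--             w = i
--             while w < end and content[w].isspace():
--                 w += 1
--             if content[w:w + 2] == '* ' and any(not c.isspace() for c in content[w + 2:end]):
--                 out.append(content[i:w])
--                 out.append('- ')
--                 out.append(content[w + 2:end])
--             else:
--                 out.append(content[i:end])
--         if end == n:
--             break
--         out.append('\n')
--         i = end + 1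
--     return ''.join(out)
-- ===== Notes on version B (the rewrite author's own statement) =====
-- stated objective: alternative
-- what changed: B is a single streaming scan over the whole string with an explicit index cursor: it locates each line end with find, tests and rewrites the line through index arithmetic and slice concatenation, and appends pieces to one output buffer - no intermediate line list from split, no per-line strip()/startswith chain, no count-limited str.replace, no join of a rebuilt list of lines.
import Mathlib
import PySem

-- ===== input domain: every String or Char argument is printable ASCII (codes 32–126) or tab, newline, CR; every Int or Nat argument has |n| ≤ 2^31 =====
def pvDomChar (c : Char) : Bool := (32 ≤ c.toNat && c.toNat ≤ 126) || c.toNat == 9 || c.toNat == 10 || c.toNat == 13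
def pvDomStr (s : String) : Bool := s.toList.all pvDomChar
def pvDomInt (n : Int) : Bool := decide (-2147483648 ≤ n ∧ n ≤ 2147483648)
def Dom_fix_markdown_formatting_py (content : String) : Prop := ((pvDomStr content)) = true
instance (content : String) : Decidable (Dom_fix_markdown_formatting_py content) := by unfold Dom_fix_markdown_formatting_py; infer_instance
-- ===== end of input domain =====

-- B replaces A's split-into-lines / per-line branch loop / join pipeline by one streaming
-- scan over the whole string (line ends found in place, fixes done by slice concatenation);
-- objective: alternative — same cost, different algorithmic organisation; return values agree everywhere.


-- ===== PORT A =====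

-- hand port of Python's s.replace(old, new, 1) (PySem has no count-limited replace):
-- scan left to right, replace the FIRST occurrence of old; exact, including old = ''.
def pvReplaceOnce (old new : List Char) : List Char → List Char
  | [] => if old.isEmpty then new else []
  | c :: cs =>
      if old.isPrefixOf (c :: cs) then new ++ (c :: cs).drop old.length
      else c :: pvReplaceOnce old new cs

-- body of A's for-loop (the value appended for one line), branch for branch
def pvFixLineA (line : List Char) : List Char :=
  if PySem.Chars.startswith line ['#'] then
    if !PySem.Chars.startswith line ['#', ' '] then pvReplaceOnce ['#'] ['#', ' '] line
    else line
  else if PySem.Chars.startswith (PySem.Chars.strip line) ['-', ' ']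
          || PySem.Chars.startswith (PySem.Chars.strip line) ['*', ' '] then
    if PySem.Chars.startswith (PySem.Chars.strip line) ['*', ' '] then
      pvReplaceOnce ['*', ' '] ['-', ' '] line
    else line
  else if PySem.Chars.startswith (PySem.Chars.strip line) ['`', '`', '`'] then line
  else line

def fix_markdown_formatting_py (content : String) : String :=
  let lines := PySem.Chars.splitOn content.toList ['\n']
  let fixed_lines := (PySem.List.enumerate lines).foldl (fun acc il => acc ++ [pvFixLineA il.2]) []
  String.mk (PySem.Chars.join ['\n'] fixed_lines)

-- ===== PORT B =====

-- the rewrite Source B performs on one line segment (the code between two line ends), kept as a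
-- named helper; Source B's absolute indices i/end/w become relative take/drop on the segment —
-- exact, since the segment contains no '\n' (so content[w:w+2] == '* ' can only match inside it)
def pvFixSeg (line : List Char) : List Char :=
  if line.take 1 = ['#'] then
    if (line.drop 1).take 1 = [' '] then line
    else '#' :: ' ' :: line.drop 1
  else
    let w := (line.takeWhile PySem.Chars.isspace).length
    if (line.drop w).take 2 = ['*', ' '] ∧
        (line.drop (w + 2)).any (fun c => !PySem.Chars.isspace c) = true then
      line.take w ++ '-' :: ' ' :: line.drop (w + 2)
    else line

-- Source B's while loop: cursor at a line start, find the line end ('find' = takeWhile/drop up to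
-- the next '\n'), emit the fixed segment, stop at end of string or step past the newline
def pvScanB (cs : List Char) : List Char :=
  let line := cs.takeWhile (· != '\n')
  let rest := cs.drop line.length
  if rest.isEmpty then pvFixSeg line
  else pvFixSeg line ++ '\n' :: pvScanB rest.tail
termination_by cs.length
decreasing_by
  have h2 : rest.length ≠ 0 := by
    simpa [List.isEmpty_iff, List.length_eq_zero_iff] using ‹¬ rest.isEmpty = true›
  have h5 : (cs.drop (cs.takeWhile (· != '\n')).length).length = rest.length := rfl
  have h1 : rest.length ≤ cs.length := by
    rw [← h5, List.length_drop]; omega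
  simp only [List.length_tail]
  omega

def fix_markdown_formatting_py_alt (content : String) : String :=
  String.mk (pvScanB content.toList)

-- ===== PRECONDITION & SPEC =====
def Spec_fix_markdown_formatting_py (content : String) (out : String) : Prop := out = fix_markdown_formatting_py_alt content
instance (content : String) (out : String) : Decidable (Spec_fix_markdown_formatting_py content out) := by unfold Spec_fix_markdown_formatting_py; infer_instance

-- ===== CLAIM (what is proved, stated in full; the proofs are below) =====
def Claim_equal_fix_markdown_formatting_py : Prop := ∀ (content : String), Dom_fix_markdown_formatting_py content → Spec_fix_markdown_formatting_py content (fix_markdown_formatting_py content)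

-- ===== LEMMAS AND PROOFS =====

-- proof-side reference splitter: pvMySplit pre cs prepends pre to the first piece of
-- cs split on '\n'; it characterises both A's splitOn and the line structure of B's scan
def pvMySplit (pre : List Char) : List Char → List (List Char)
  | [] => [pre]
  | c :: r => if c = '\n' then pre :: pvMySplit [] r else pvMySplit (pre ++ [c]) r

theorem pv_go_eq (fuel : Nat) : ∀ (l cur : List Char) (accs : List (List Char)),
    l.length < fuel →
    PySem.Chars.splitOn.go ['\n'] fuel l cur accs = accs.reverse ++ pvMySplit cur.reverse l := by
  induction fuel with
  | zero => intro l cur accs h; omega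
  | succ n ih =>
      intro l cur accs h
      cases l with
      | nil => simp [PySem.Chars.splitOn.go, pvMySplit]
      | cons c rest =>
          by_cases hc : c = '\n'
          · subst hc
            rw [PySem.Chars.splitOn.go]
            simp only [List.isPrefixOf, beq_self_eq_true, Bool.and_self, if_true]
            rw [ih _ _ _ (by simpa using Nat.lt_of_succ_lt_succ h)]
            simp [pvMySplit]
          · rw [PySem.Chars.splitOn.go]
            have hpre : (['\n'] : List Char).isPrefixOf (c :: rest) = false := by
              simp [List.isPrefixOf]
              intro hx; exact hc hx.symm
            rw [if_neg (by simp [hpre])]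
            rw [ih _ _ _ (by simpa using Nat.lt_of_succ_lt_succ h)]
            simp [pvMySplit, hc]

theorem pv_splitOn_eq (cs : List Char) :
    PySem.Chars.splitOn cs ['\n'] = pvMySplit [] cs := by
  unfold PySem.Chars.splitOn
  rw [pv_go_eq _ _ _ _ (by omega)]
  simp

theorem pvMySplit_ne_nil (pre : List Char) (cs : List Char) : pvMySplit pre cs ≠ [] := by
  induction cs generalizing pre with
  | nil => simp [pvMySplit]
  | cons c r ih => by_cases hc : c = '\n' <;> simp [pvMySplit, hc, ih]

theorem pvMySplit_of_drop_nil (cs pre : List Char) (h : cs.dropWhile (· != '\n') = []) :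
    pvMySplit pre cs = [pre ++ cs] := by
  induction cs generalizing pre with
  | nil => simp [pvMySplit]
  | cons c r ih =>
      by_cases hc : c = '\n'
      · rw [List.dropWhile_cons_of_neg (by simp [hc])] at h
        simp at h
      · rw [List.dropWhile_cons_of_pos (by simp [hc])] at h
        simp [pvMySplit, hc, ih (pre ++ [c]) h]

theorem pvMySplit_of_drop_cons (cs pre : List Char) (d : Char) (tl : List Char)
    (h : cs.dropWhile (· != '\n') = d :: tl) :
    pvMySplit pre cs = (pre ++ cs.takeWhile (· != '\n')) :: pvMySplit [] tl := by
  induction cs generalizing pre with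
  | nil => simp at h
  | cons c r ih =>
      by_cases hc : c = '\n'
      · rw [List.dropWhile_cons_of_neg (by simp [hc])] at h
        injection h with h1 h2
        subst h1; subst h2
        rw [List.takeWhile_cons_of_neg (by simp [hc])]
        simp [pvMySplit, hc]
      · rw [List.dropWhile_cons_of_pos (by simp [hc])] at h
        rw [List.takeWhile_cons_of_pos (by simp [hc])]
        simp [pvMySplit, hc, ih (pre ++ [c]) h]

-- ===== the per-line lemma corpus (A's branch chain vs the segment rewrite) =====

theorem pv_map_enumerate {α β : Type} (f : α → β) (l : List α) (s : Int) :
    (PySem.List.enumerate l s).map (fun p => f p.2) = l.map f := by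
  induction l generalizing s with
  | nil => rfl
  | cons x t ih => simp [PySem.List.enumerate, ih]

theorem pv_drop_takeWhile_length (p : Char → Bool) (l : List Char) :
    l.drop (l.takeWhile p).length = l.dropWhile p := by
  induction l with
  | nil => rfl
  | cons c cs ih => by_cases h : p c <;> simp [h, ih]

theorem pv_take_takeWhile_length (p : Char → Bool) (l : List Char) :
    l.take (l.takeWhile p).length = l.takeWhile p := by
  induction l with
  | nil => rfl
  | cons c cs ih => by_cases h : p c <;> simp [h, ih]

theorem pv_rstrip_cons_of_neg {d : Char} (t : List Char)
    (h : PySem.Chars.isspace d = false) :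
    PySem.Chars.rstrip (d :: t) = d :: PySem.Chars.rstrip t := by
  simp only [PySem.Chars.rstrip, List.reverse_cons, List.dropWhile_append]
  by_cases he : List.dropWhile PySem.Chars.isspace t.reverse = []
  · simp [he, h]
  · rw [if_neg (by simpa [List.isEmpty_iff] using he)]
    simp

theorem pv_rstrip_eq_nil_iff (t : List Char) :
    PySem.Chars.rstrip t = [] ↔ ∀ x ∈ t, PySem.Chars.isspace x = true := by
  simp [PySem.Chars.rstrip, List.dropWhile_eq_nil_iff]

theorem pv_head?_rstrip (t : List Char) :
    (PySem.Chars.rstrip t).head? =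
      if ∀ x ∈ t, PySem.Chars.isspace x = true then none else t.head? := by
  induction t with
  | nil => simp [PySem.Chars.rstrip]
  | cons c t ih =>
      by_cases hc : PySem.Chars.isspace c
      · by_cases ht : ∀ x ∈ t, PySem.Chars.isspace x = true
        · have hnil : PySem.Chars.rstrip (c :: t) = [] := by
            rw [pv_rstrip_eq_nil_iff]
            intro x hx
            rcases List.mem_cons.1 hx with rfl | hx
            · exact hc
            · exact ht x hx
          rw [hnil, if_pos (fun x hx => by
            rcases List.mem_cons.1 hx with rfl | hx
            exacts [hc, ht x hx])]
          rfl
        · have hne : List.dropWhile PySem.Chars.isspace t.reverse ≠ [] := by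
            intro h0
            exact ht (by simpa [List.dropWhile_eq_nil_iff] using h0)
          have hcons : PySem.Chars.rstrip (c :: t) = c :: PySem.Chars.rstrip t := by
            simp only [PySem.Chars.rstrip, List.reverse_cons, List.dropWhile_append]
            rw [if_neg (by simpa [List.isEmpty_iff] using hne)]
            simp
          rw [hcons, if_neg (by intro hall; exact ht fun x hx => hall x (List.mem_cons_of_mem _ hx))]
          rfl
      · rw [pv_rstrip_cons_of_neg t (by simpa using hc)]
        rw [if_neg (by intro hall; exact hc (hall c (List.mem_cons_self)))]
        rfl

theorem pv_strip_of_dropWhile_nil (l : List Char)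
    (h : l.dropWhile PySem.Chars.isspace = []) : PySem.Chars.strip l = [] := by
  simp [PySem.Chars.strip, PySem.Chars.lstrip, h, PySem.Chars.rstrip]

theorem pv_strip_of_dropWhile_cons {d : Char} {t : List Char} (l : List Char)
    (h : l.dropWhile PySem.Chars.isspace = d :: t) :
    PySem.Chars.strip l = d :: PySem.Chars.rstrip t := by
  have hd : PySem.Chars.isspace d = false := by
    have := List.head?_dropWhile_not PySem.Chars.isspace l
    rw [h] at this; simpa using this
  simp [PySem.Chars.strip, PySem.Chars.lstrip, h, pv_rstrip_cons_of_neg t hd]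

theorem pv_sw2 (x y d e : Char) (r : List Char) :
    PySem.Chars.startswith (d :: e :: r) [x, y] = ((x == d) && (y == e)) := by
  simp [PySem.Chars.startswith, List.isPrefixOf]

theorem pv_condStar (l : List Char) :
    PySem.Chars.startswith (PySem.Chars.strip l) ['*', ' '] = true ↔
      ((l.dropWhile PySem.Chars.isspace).take 2 = ['*', ' '] ∧
        ¬ ∀ x ∈ (l.dropWhile PySem.Chars.isspace).drop 2, PySem.Chars.isspace x = true) := by
  cases h : l.dropWhile PySem.Chars.isspace with
  | nil => simp [pv_strip_of_dropWhile_nil l h, PySem.Chars.startswith]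
  | cons d t =>
      rw [pv_strip_of_dropWhile_cons l h]
      cases t with
      | nil =>
          constructor
          · intro hs
            exfalso
            have : PySem.Chars.rstrip ([] : List Char) = [] := rfl
            rw [this] at hs
            simp [PySem.Chars.startswith, List.isPrefixOf] at hs
          · rintro ⟨h1, _⟩
            exfalso
            simp at h1
      | cons c t2 =>
          have hh := pv_head?_rstrip (c :: t2)
          constructor
          · intro hs
            cases hr : PySem.Chars.rstrip (c :: t2) with
            | nil =>
                rw [hr] at hs
                exfalso; simp [PySem.Chars.startswith, List.isPrefixOf] at hs
            | cons e r =>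
                rw [hr] at hs hh
                rw [pv_sw2] at hs
                have hde : d = '*' ∧ e = ' ' := by
                  constructor
                  · exact ((beq_iff_eq).1 (Bool.and_elim_left hs)).symm
                  · exact ((beq_iff_eq).1 (Bool.and_elim_right hs)).symm
                by_cases hall : ∀ x ∈ (c :: t2), PySem.Chars.isspace x = true
                · rw [if_pos hall] at hh; simp at hh
                · rw [if_neg hall] at hh
                  have he : e = c := by simpa using hh
                  refine ⟨by simp [hde.1, ← he, hde.2], ?_⟩
                  intro h2
                  apply hall
                  intro x hx
                  rcases List.mem_cons.1 hx with rfl | hx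
                  · rw [← he, hde.2]; decide
                  · exact h2 x (by simpa using hx)
          · rintro ⟨h1, h2⟩
            have h1' : d = '*' ∧ c = ' ' := by simpa using h1
            have hall : ¬ ∀ x ∈ (c :: t2), PySem.Chars.isspace x = true := by
              intro hall
              exact h2 (fun x hx => hall x (List.mem_cons_of_mem _ (by simpa using hx)))
            rw [if_neg hall] at hh
            cases hr : PySem.Chars.rstrip (c :: t2) with
            | nil => exact absurd ((pv_rstrip_eq_nil_iff _).1 hr) hall
            | cons e r =>
                rw [hr] at hh
                have he : e = c := by simpa using hh
                rw [pv_sw2]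
                simp [h1'.1, he, h1'.2]

theorem pv_replaceOnce_star (l : List Char)
    (h : (l.dropWhile PySem.Chars.isspace).take 2 = ['*', ' ']) :
    pvReplaceOnce ['*', ' '] ['-', ' '] l =
      l.takeWhile PySem.Chars.isspace ++ '-' :: ' ' :: (l.dropWhile PySem.Chars.isspace).drop 2 := by
  induction l with
  | nil => simp at h
  | cons c cs ih =>
      by_cases hc : PySem.Chars.isspace c
      · have hcne : (('*' : Char) == c) = false := by
          cases hq : (('*' : Char) == c)
          · rfl
          · exfalso
            have hcc : '*' = c := (beq_iff_eq).1 hq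
            rw [← hcc] at hc; exact absurd hc (by decide)
        have hpre : (['*', ' '] : List Char).isPrefixOf (c :: cs) = false := by
          simp [List.isPrefixOf, hcne]
        rw [List.dropWhile_cons_of_pos hc] at h
        simp only [pvReplaceOnce, hpre, Bool.false_eq_true, if_false]
        rw [List.takeWhile_cons_of_pos hc, List.dropWhile_cons_of_pos hc]
        simp [ih h]
      · have hc' : PySem.Chars.isspace c = false := by simpa using hc
        rw [List.dropWhile_cons_of_neg (by simp [hc'])] at h
        have hcc : c :: cs.take 1 = ['*', ' '] := by simpa using h
        simp only [List.cons.injEq] at hcc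
        rcases hcc with ⟨rfl, hcs⟩
        cases cs with
        | nil => simp at hcs
        | cons e r =>
            have he : e = ' ' := by simpa using hcs
            subst he
            have hfals : ¬ PySem.Chars.isspace '*' = true := by decide
            rw [List.takeWhile_cons_of_neg hfals, List.dropWhile_cons_of_neg hfals]
            simp [pvReplaceOnce, List.isPrefixOf]

-- B's segment rewrite agrees with A's per-line branch chain
theorem pv_fixSeg_eq (l : List Char) : pvFixSeg l = pvFixLineA l := by
  cases l with
  | nil => decide
  | cons c cs =>
      by_cases hc : c = '#'
      · subst hc
        have hA : PySem.Chars.startswith ('#' :: cs) ['#'] = true := by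
          simp [PySem.Chars.startswith, List.isPrefixOf]
        cases cs with
        | nil => decide
        | cons e r =>
            by_cases he : e = ' '
            · subst he
              simp [pvFixLineA, pvFixSeg, PySem.Chars.startswith, List.isPrefixOf]
            · have h2 : PySem.Chars.startswith ('#' :: e :: r) ['#', ' '] = false := by
                simp [PySem.Chars.startswith, List.isPrefixOf]
                intro hx; exact absurd hx.symm he
              have hB2 : ((('#' :: e :: r).drop 1).take 1) ≠ [' '] := by
                simp; intro hx; exact he hx
              rw [pvFixLineA, pvFixSeg, if_pos (by simp), if_neg hB2, if_pos hA,
                if_pos (by simp [h2])]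
              simp [pvReplaceOnce, List.isPrefixOf]
      · have hA : PySem.Chars.startswith (c :: cs) ['#'] = false := by
          simp [PySem.Chars.startswith, List.isPrefixOf]
          intro hx; exact absurd hx.symm hc
        have hB0 : ((c :: cs).take 1) ≠ ['#'] := by
          simp; intro hx; exact hc hx
        set l := c :: cs with hl
        have hdrop2 : l.drop ((l.takeWhile PySem.Chars.isspace).length + 2) =
            (l.dropWhile PySem.Chars.isspace).drop 2 := by
          rw [← pv_drop_takeWhile_length PySem.Chars.isspace l, List.drop_drop]
        simp only [pvFixLineA, pvFixSeg, hA, Bool.false_eq_true, if_false, if_neg hB0,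
          pv_drop_takeWhile_length, pv_take_takeWhile_length, hdrop2]
        by_cases hstar : PySem.Chars.startswith (PySem.Chars.strip l) ['*', ' '] = true
        · have hrhs := (pv_condStar l).1 hstar
          have hany : ((l.dropWhile PySem.Chars.isspace).drop 2).any
              (fun c => !PySem.Chars.isspace c) = true := by
            rcases not_forall.1 hrhs.2 with ⟨x, hx⟩
            rcases _root_.not_imp.1 hx with ⟨hmem, hns⟩
            exact List.any_eq_true.2 ⟨x, hmem, by simpa using hns⟩
          rw [if_pos ⟨hrhs.1, hany⟩]
          simp only [hstar, Bool.or_true, if_true]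
          rw [pv_replaceOnce_star l hrhs.1]
        · have hstar' : PySem.Chars.startswith (PySem.Chars.strip l) ['*', ' '] = false := by
            simpa using hstar
          have hguard : ¬ ((l.dropWhile PySem.Chars.isspace).take 2 = ['*', ' '] ∧
              ((l.dropWhile PySem.Chars.isspace).drop 2).any
                (fun c => !PySem.Chars.isspace c) = true) := by
            rintro ⟨g1, g2⟩
            rcases List.any_eq_true.1 g2 with ⟨x, hmem, hns⟩
            exact hstar ((pv_condStar l).2 ⟨g1, fun hall => by
              rw [hall x hmem] at hns; simp at hns⟩)
          rw [if_neg hguard]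
          simp only [hstar', Bool.or_false, Bool.false_eq_true, if_false]
          split_ifs <;> rfl

-- B's streaming scan computes exactly 'join of the fixed pieces of the split'
theorem pv_scan_eq_aux (n : Nat) : ∀ cs : List Char, cs.length ≤ n →
    pvScanB cs = PySem.Chars.join ['\n'] ((pvMySplit [] cs).map pvFixLineA) := by
  induction n with
  | zero =>
      intro cs h
      have : cs = [] := List.eq_nil_of_length_eq_zero (Nat.le_zero.1 h)
      subst this
      rw [pvScanB.eq_def]
      simp only [pvMySplit, PySem.Chars.join, List.intercalate, List.map_cons, List.map_nil]
      simp
      decide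
  | succ n ih =>
      intro cs h
      rw [pvScanB.eq_def]
      simp only []
      rw [pv_drop_takeWhile_length (· != '\n') cs]
      cases hd : cs.dropWhile (· != '\n') with
      | nil =>
          have htw : cs.takeWhile (· != '\n') = cs := by
            have := List.takeWhile_append_dropWhile (p := (· != '\n')) (l := cs)
            rw [hd] at this; simpa using this
          rw [pvMySplit_of_drop_nil cs [] hd]
          simp [htw, PySem.Chars.join, List.intercalate, pv_fixSeg_eq]
      | cons d tl =>
          have hlen : tl.length ≤ n := by
            have hle := (List.dropWhile_sublist (p := (· != '\n')) (l := cs)).length_le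
            rw [hd] at hle
            simp at hle
            omega
          rw [pvMySplit_of_drop_cons cs [] d tl hd]
          simp only [List.isEmpty_cons, Bool.false_eq_true, if_false, List.tail_cons]
          rcases hms : pvMySplit [] tl with _ | ⟨y, ys⟩
          · exact absurd hms (pvMySplit_ne_nil [] tl)
          · rw [ih tl hlen, hms]
            simp [PySem.Chars.join, List.intercalate, pv_fixSeg_eq]

theorem pv_scan_eq (cs : List Char) :
    pvScanB cs = PySem.Chars.join ['\n'] ((pvMySplit [] cs).map pvFixLineA) :=
  pv_scan_eq_aux cs.length cs (Nat.le_refl _)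

-- ===== VERDICT (by name: the statement is the Claim_ definition above) =====
theorem fix_markdown_formatting_py_spec : Claim_equal_fix_markdown_formatting_py := by
  intro content _
  unfold Spec_fix_markdown_formatting_py fix_markdown_formatting_py fix_markdown_formatting_py_alt
  simp only [PySem.List.foldl_append_singleton_eq_map, List.nil_append]
  rw [pv_map_enumerate pvFixLineA (PySem.Chars.splitOn content.toList ['\n']) 0]
  rw [pv_splitOn_eq, pv_scan_eq]
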